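-- pv_equiv track=rewrite | github.com/HJJoosse/Adventofcode | 2021/python/day11.py | make_flashes
-- ===== SOURCE A (Python) =====
-- def make_flashes(charge,flashes):
--     for y,x in flashes:
--         coords = [(y+i,x+j) for i in [-1,0,1] for j in [-1,0,1] if ((i,j) != (0,0)) & (x+j >= 0) & (y+i >= 0)]
--         for yi,xj in coords:
--
--             try:
--                 charge[yi][xj] += 1
--             except IndexError:
--                 continue
--     return charge
-- ===== SOURCE B (Python) =====
-- def make_flashes(charge, flashes):
--     # Two-phase: tally all +1 increments per target cell into a dict, then apply
--     # each total once, skipping out-of-range targets.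
--     counts = {}
--     for y, x in flashes:
--         for i in (-1, 0, 1):
--             for j in (-1, 0, 1):
--                 if (i, j) != (0, 0) and x + j >= 0 and y + i >= 0:
--                     counts[(y + i, x + j)] = counts.get((y + i, x + j), 0) + 1
--     for (yi, xj), c in counts.items():
--         if yi < len(charge) and xj < len(charge[yi]):
--             charge[yi][xj] += c
--     return charge
-- ===== Notes on version B (the rewrite author's own statement) =====
-- stated objective: alternative
-- what changed: A increments each neighbour cell one-by-one inside the flash loop; B first tallies all increments per target cell into a dict in one counting pass, then applies each total once with a bounds check.
import Mathlib
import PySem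

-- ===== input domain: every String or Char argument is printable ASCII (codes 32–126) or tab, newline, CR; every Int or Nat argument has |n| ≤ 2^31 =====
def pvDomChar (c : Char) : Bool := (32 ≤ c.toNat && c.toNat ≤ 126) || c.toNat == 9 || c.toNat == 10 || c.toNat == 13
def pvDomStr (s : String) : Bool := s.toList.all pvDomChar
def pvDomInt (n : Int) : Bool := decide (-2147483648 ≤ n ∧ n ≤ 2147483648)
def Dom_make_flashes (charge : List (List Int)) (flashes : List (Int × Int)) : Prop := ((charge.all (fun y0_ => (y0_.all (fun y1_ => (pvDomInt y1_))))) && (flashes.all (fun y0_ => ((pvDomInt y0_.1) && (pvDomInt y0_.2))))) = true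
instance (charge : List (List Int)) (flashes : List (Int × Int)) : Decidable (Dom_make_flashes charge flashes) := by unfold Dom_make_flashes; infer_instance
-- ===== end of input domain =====

-- B tallies all +1 increments per target cell into a dict first, then applies each total
-- once (alternative two-phase decomposition, same cost); A mutates `charge` in place in
-- Python — the equivalence proved here is about the return value.


-- ===== PORT A =====
def pvOffsA : List Int := [-1, 0, 1]

-- the list comprehension building `coords`
def pvCoordsA (y x : Int) : List (Int × Int) :=
  pvOffsA.foldl (fun acc i =>
    pvOffsA.foldl (fun acc j =>
      if ¬(i = 0 ∧ j = 0) ∧ 0 ≤ x + j ∧ 0 ≤ y + i then acc ++ [(y + i, x + j)] else acc) acc) []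

-- `try: charge[yi][xj] += 1 / except IndexError: continue`.  yi, xj are ≥ 0 here (the
-- comprehension filtered negatives out), so IndexError happens exactly on positive
-- out-of-range indices; List.modify is a no-op there, which is exact.
def pvBumpA (g : List (List Int)) (yi xj : Int) : List (List Int) :=
  g.modify yi.toNat (fun row => row.modify xj.toNat (· + 1))

def make_flashes (charge : List (List Int)) (flashes : List (Int × Int)) : List (List Int) :=
  flashes.foldl (fun g p =>
    (pvCoordsA p.1 p.2).foldl (fun g q => pvBumpA g q.1 q.2) g) charge

-- ===== PORT B =====
-- `counts[k] = counts.get(k, 0) + 1`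
def pvCountStep (d : PySem.Dict (Int × Int) Int) (k : Int × Int) : PySem.Dict (Int × Int) Int :=
  d.insert k (d.getD k 0 + 1)

def make_flashes_alt (charge : List (List Int)) (flashes : List (Int × Int)) : List (List Int) :=
  let counts : PySem.Dict (Int × Int) Int :=
    flashes.foldl (fun d p =>
      pvOffsA.foldl (fun d i =>
        pvOffsA.foldl (fun d j =>
          if ¬(i = 0 ∧ j = 0) ∧ 0 ≤ p.1 + i ∧ 0 ≤ p.2 + j
          then pvCountStep d (p.1 + i, p.2 + j) else d) d) d) PySem.Dict.empty
  counts.items.foldl (fun g kv =>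
    if kv.1.1 < (g.length : Int) ∧ kv.1.2 < ((PySem.List.pyGetD g kv.1.1 []).length : Int)
    then g.modify kv.1.1.toNat (fun row => row.modify kv.1.2.toNat (· + kv.2)) else g) charge

-- ===== PRECONDITION & SPEC =====
def Spec_make_flashes (charge : List (List Int)) (flashes : List (Int × Int)) (out : List (List Int)) : Prop := out = make_flashes_alt charge flashes
instance (charge : List (List Int)) (flashes : List (Int × Int)) (out : List (List Int)) : Decidable (Spec_make_flashes charge flashes out) := by unfold Spec_make_flashes; infer_instance

-- ===== CLAIM (what is proved, stated in full; the proofs are below) =====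
def Claim_equal_make_flashes : Prop := ∀ (charge : List (List Int)) (flashes : List (Int × Int)), Dom_make_flashes charge flashes → Spec_make_flashes charge flashes (make_flashes charge flashes)

-- ===== LEMMAS AND PROOFS =====

-- add c at cell k (Int coordinates, no-op when out of range)
def pvAddAt (g : List (List Int)) (k : Int × Int) (c : Int) : List (List Int) :=
  g.modify k.1.toNat (fun row => row.modify k.2.toNat (· + c))

-- the filtered neighbourhood as a flatMap/filter/map expression
def pvNeigh (y x : Int) : List (Int × Int) :=
  pvOffsA.flatMap (fun i =>
    (pvOffsA.filter (fun j => decide (¬(i = 0 ∧ j = 0) ∧ 0 ≤ x + j ∧ 0 ≤ y + i))).map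
      (fun j => (y + i, x + j)))

-- all increment targets of a run
def pvTargets (flashes : List (Int × Int)) : List (Int × Int) :=
  flashes.flatMap (fun p => pvNeigh p.1 p.2)

def pvRowAt (g : List (List Int)) (r : Nat) : List Int := (g[r]?).getD []
def pvEnt (g : List (List Int)) (r c : Nat) : Int := ((pvRowAt g r)[c]?).getD 0

lemma pvFoldlFlatMap {α β γ : Type} (l : List α) (h : α → List β) (f : γ → β → γ) (init : γ) :
    (l.flatMap h).foldl f init = l.foldl (fun a x => (h x).foldl f a) init := by
  induction l generalizing init with
  | nil => rfl
  | cons a t ih => simp [List.foldl_append, ih]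

lemma pvCoordsA_eq (y x : Int) : pvCoordsA y x = pvNeigh y x := by
  unfold pvCoordsA pvNeigh
  rw [PySem.List.foldl_congr_mem _ _
    (fun acc i => acc ++
      (pvOffsA.filter (fun j => decide (¬(i = 0 ∧ j = 0) ∧ 0 ≤ x + j ∧ 0 ≤ y + i))).map
        (fun j => (y + i, x + j))) _
    (fun acc i _ => PySem.List.foldl_append_ite _ _ _ _)]
  rw [PySem.List.foldl_append_eq_flatMap]
  rfl

lemma pvA_eq (charge : List (List Int)) (flashes : List (Int × Int)) :
    make_flashes charge flashes =
      (pvTargets flashes).foldl (fun g k => pvAddAt g k 1) charge := by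
  unfold make_flashes pvTargets
  rw [pvFoldlFlatMap]
  apply PySem.List.foldl_congr_mem
  intro g p _
  rw [pvCoordsA_eq]
  rfl

lemma pvCounts_eq (flashes : List (Int × Int)) :
    (flashes.foldl (fun d p =>
      pvOffsA.foldl (fun d i =>
        pvOffsA.foldl (fun d j =>
          if ¬(i = 0 ∧ j = 0) ∧ 0 ≤ p.1 + i ∧ 0 ≤ p.2 + j
          then pvCountStep d (p.1 + i, p.2 + j) else d) d) d) PySem.Dict.empty) =
      PySem.Dict.counter (pvTargets flashes) := by
  rw [← PySem.Dict.foldl_insert_getD_add_one_eq_counter]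
  unfold pvTargets
  rw [pvFoldlFlatMap]
  apply PySem.List.foldl_congr_mem
  intro d p _
  unfold pvNeigh
  rw [pvFoldlFlatMap]
  apply PySem.List.foldl_congr_mem
  intro d i _
  rw [PySem.List.foldl_ite_eq_foldl_filter
    (fun j => ¬(i = 0 ∧ j = 0) ∧ 0 ≤ p.1 + i ∧ 0 ≤ p.2 + j)
    (fun d j => pvCountStep d (p.1 + i, p.2 + j))]
  rw [List.foldl_map]
  rw [List.filter_congr (q := fun j => decide (¬(i = 0 ∧ j = 0) ∧ 0 ≤ p.2 + j ∧ 0 ≤ p.1 + i))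
    (fun j _ => by simp only [decide_eq_decide]; tauto)]
  rfl

lemma pvTargets_nonneg (flashes : List (Int × Int)) :
    ∀ k ∈ pvTargets flashes, 0 ≤ k.1 ∧ 0 ≤ k.2 := by
  intro k hk
  simp only [pvTargets, pvNeigh, List.mem_flatMap, List.mem_map, List.mem_filter,
    decide_eq_true_eq] at hk
  obtain ⟨p, -, i, -, j, hj, rfl⟩ := hk
  exact ⟨hj.2.2.2, hj.2.2.1⟩

lemma pvModify_oob {α : Type} (l : List α) (i : Nat) (f : α → α) (h : l.length ≤ i) :
    l.modify i f = l := by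
  apply List.ext_getElem?
  intro j
  rw [List.getElem?_modify]
  by_cases hij : i = j
  · subst hij
    rw [List.getElem?_eq_none (by omega)]
    rfl
  · cases l[j]? <;> simp [hij]

lemma pvLen_addAt (g : List (List Int)) (k : Int × Int) (c : Int) :
    (pvAddAt g k c).length = g.length := by
  simp [pvAddAt]

lemma pvRowLen_addAt (g : List (List Int)) (k : Int × Int) (c : Int) (r : Nat) :
    (pvRowAt (pvAddAt g k c) r).length = (pvRowAt g r).length := by
  unfold pvRowAt pvAddAt
  rw [List.getElem?_modify]
  cases g[r]? with
  | none => rfl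
  | some row => by_cases h : k.1.toNat = r <;> simp [h]

lemma pvEnt_addAt (g : List (List Int)) (k : Int × Int) (c0 : Int) (r c : Nat)
    (hk1 : 0 ≤ k.1) (hk2 : 0 ≤ k.2) :
    pvEnt (pvAddAt g k c0) r c =
      if k.1 = (r : Int) ∧ k.2 = (c : Int) ∧ r < g.length ∧ c < (pvRowAt g r).length
      then pvEnt g r c + c0 else pvEnt g r c := by
  unfold pvEnt pvRowAt pvAddAt
  by_cases hr : r < g.length
  · rw [List.getElem?_modify, List.getElem?_eq_getElem hr]
    simp only [Option.map_eq_map, Option.map_some, Option.getD_some]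
    by_cases h1 : k.1.toNat = r
    · rw [if_pos h1, List.getElem?_modify]
      by_cases hc : c < g[r].length
      · rw [List.getElem?_eq_getElem hc]
        simp only [Option.map_eq_map, Option.map_some, Option.getD_some]
        by_cases h2 : k.2.toNat = c
        · rw [if_pos h2, if_pos ⟨by omega, by omega, hr, hc⟩]
        · rw [if_neg h2, if_neg (by rintro ⟨-, e, -⟩; exact h2 (by omega))]
      · have e2 : g[r][c]? = none := List.getElem?_eq_none (by omega)
        rw [e2, if_neg (by tauto)]
        rfl
    · rw [if_neg h1, if_neg (by rintro ⟨e, -⟩; exact h1 (by omega))]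
  · have e1 : (g.modify k.1.toNat (fun row => row.modify k.2.toNat (· + c0)))[r]? = none :=
      List.getElem?_eq_none (by simpa using (by omega : g.length ≤ r))
    have e2 : g[r]? = none := List.getElem?_eq_none (by omega)
    rw [e1, e2, if_neg (by tauto)]

lemma pvAddAt_oob (g : List (List Int)) (k : Int × Int) (c : Int)
    (hk1 : 0 ≤ k.1) (hk2 : 0 ≤ k.2)
    (h : ¬(k.1 < (g.length : Int) ∧ k.2 < ((PySem.List.pyGetD g k.1 []).length : Int))) :
    pvAddAt g k c = g := by
  unfold pvAddAt
  push Not at h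
  by_cases hr : (g.length : Int) ≤ k.1
  · exact pvModify_oob _ _ _ (by omega)
  · have hr' : k.1 < (g.length : Int) := by omega
    have hlen := h hr'
    rw [PySem.List.pyGetD_eq_getElem g [] hk1 hr'] at hlen
    apply List.ext_getElem?
    intro j
    rw [List.getElem?_modify]
    by_cases hij : k.1.toNat = j
    · have hj : j < g.length := by omega
      rw [List.getElem?_eq_getElem hj]
      simp only [if_pos hij, Option.map_eq_map, Option.map_some]
      congr 1
      apply pvModify_oob
      have : g[j] = g[k.1.toNat] := by congr 1; omega
      rw [this]
      omega
    · cases g[j]? <;> simp [hij]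

lemma pvLen_foldl (M : List ((Int × Int) × Int)) (g : List (List Int)) :
    (M.foldl (fun g kc => pvAddAt g kc.1 kc.2) g).length = g.length := by
  induction M generalizing g with
  | nil => rfl
  | cons a t ih => simp [List.foldl_cons, ih, pvLen_addAt]

lemma pvRowLen_foldl (M : List ((Int × Int) × Int)) (g : List (List Int)) (r : Nat) :
    (pvRowAt (M.foldl (fun g kc => pvAddAt g kc.1 kc.2) g) r).length = (pvRowAt g r).length := by
  induction M generalizing g with
  | nil => rfl
  | cons a t ih => simp [List.foldl_cons, ih, pvRowLen_addAt]

lemma pvEnt_foldl (M : List ((Int × Int) × Int)) (g : List (List Int))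
    (hnn : ∀ kc ∈ M, 0 ≤ kc.1.1 ∧ 0 ≤ kc.1.2) (r c : Nat) :
    pvEnt (M.foldl (fun g kc => pvAddAt g kc.1 kc.2) g) r c =
      pvEnt g r c +
        if r < g.length ∧ c < (pvRowAt g r).length
        then ((M.filter (fun kc => kc.1 = ((r : Int), (c : Int)))).map (·.2)).sum else 0 := by
  induction M generalizing g with
  | nil => simp
  | cons kc t ih =>
    simp only [List.foldl_cons]
    rw [ih _ (fun x hx => hnn x (List.mem_cons_of_mem _ hx))]
    have hkc := hnn kc List.mem_cons_self
    rw [pvEnt_addAt g kc.1 kc.2 r c hkc.1 hkc.2, pvLen_addAt, pvRowLen_addAt]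
    by_cases hin : r < g.length ∧ c < (pvRowAt g r).length
    · rw [if_pos hin, if_pos hin]
      by_cases hm : kc.1 = ((r : Int), (c : Int))
      · rw [if_pos ⟨by rw [hm], by rw [hm], hin.1, hin.2⟩,
          List.filter_cons_of_pos (by simpa using hm)]
        simp only [List.map_cons, List.sum_cons]
        ring
      · rw [if_neg (fun hcon => hm (Prod.ext hcon.1 hcon.2.1)),
          List.filter_cons_of_neg (by simpa using hm)]
    · rw [if_neg hin, if_neg hin, if_neg (fun hcon => hin ⟨hcon.2.2.1, hcon.2.2.2⟩)]

lemma pvEq_of_ent (a b : List (List Int)) (hlen : a.length = b.length)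
    (hrow : ∀ r, (pvRowAt a r).length = (pvRowAt b r).length)
    (hent : ∀ r c, pvEnt a r c = pvEnt b r c) : a = b := by
  apply List.ext_getElem?
  intro r
  by_cases hr : r < a.length
  · have hrb : r < b.length := by omega
    have h1 : pvRowAt a r = a[r] := by unfold pvRowAt; rw [List.getElem?_eq_getElem hr]; rfl
    have h2 : pvRowAt b r = b[r] := by unfold pvRowAt; rw [List.getElem?_eq_getElem hrb]; rfl
    rw [List.getElem?_eq_getElem hr, List.getElem?_eq_getElem hrb]
    congr 1
    apply List.ext_getElem?
    intro c
    have hrow' := hrow r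
    rw [h1, h2] at hrow'
    by_cases hc : c < a[r].length
    · have hcb : c < b[r].length := by omega
      have he := hent r c
      unfold pvEnt at he
      rw [h1, h2, List.getElem?_eq_getElem hc, List.getElem?_eq_getElem hcb] at he
      rw [List.getElem?_eq_getElem hc, List.getElem?_eq_getElem hcb]
      simpa using he
    · rw [List.getElem?_eq_none (by omega), List.getElem?_eq_none (by omega)]
  · rw [List.getElem?_eq_none (by omega), List.getElem?_eq_none (by omega)]

lemma pvFilter_eq_replicate (l : List (Int × Int)) (v : Int × Int) :
    l.filter (fun k => decide (k = v)) = List.replicate (l.count v) v := by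
  rw [← List.filter_beq (l := l) v]
  exact List.filter_congr (fun x _ => by rw [Bool.eq_iff_iff]; simp)

lemma pvSum_eq (L : List (Int × Int)) (v : Int × Int) :
    (((L.map (fun k => (k, (1 : Int)))).filter (fun kc => decide (kc.1 = v))).map (·.2)).sum =
      ((((PySem.Set.ofList L).map (fun k => (k, (L.count k : Int)))).filter
        (fun kc => decide (kc.1 = v))).map (·.2)).sum := by
  rw [List.filter_map, List.filter_map, List.map_map, List.map_map]
  have e1 : ((fun kc : (Int × Int) × Int => decide (kc.1 = v)) ∘
      (fun k : Int × Int => (k, (1 : Int)))) = fun k => decide (k = v) := by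
    funext k; simp [Function.comp]
  have e2 : ((fun kc : (Int × Int) × Int => decide (kc.1 = v)) ∘
      (fun k : Int × Int => (k, (L.count k : Int)))) = fun k => decide (k = v) := by
    funext k; simp [Function.comp]
  have e3 : ((fun x : (Int × Int) × Int => x.2) ∘
      (fun k : Int × Int => (k, (1 : Int)))) = fun _ => (1 : Int) := rfl
  have e4 : ((fun x : (Int × Int) × Int => x.2) ∘
      (fun k : Int × Int => (k, (L.count k : Int)))) = fun k => (L.count k : Int) := rfl
  rw [e1, e2, e3, e4, pvFilter_eq_replicate, pvFilter_eq_replicate,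
    List.map_replicate, List.map_replicate, List.sum_replicate, List.sum_replicate]
  by_cases hv : v ∈ L
  · rw [List.count_eq_one_of_mem (PySem.Set.nodup_ofList L)
      ((PySem.Set.mem_ofList L v).mpr hv)]
    simp
  · rw [List.count_eq_zero.mpr hv,
      List.count_eq_zero.mpr (fun hc => hv ((PySem.Set.mem_ofList L v).mp hc))]
    simp

lemma pvB_eq (charge : List (List Int)) (flashes : List (Int × Int)) :
    make_flashes_alt charge flashes =
      ((PySem.Set.ofList (pvTargets flashes)).map
        (fun k => (k, ((pvTargets flashes).count k : Int)))).foldl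
        (fun g kv => pvAddAt g kv.1 kv.2) charge := by
  simp only [make_flashes_alt]
  rw [pvCounts_eq, PySem.Dict.items_counter]
  apply PySem.List.foldl_congr_mem
  intro g kv hkv
  have hk : kv.1 ∈ pvTargets flashes := by
    obtain ⟨k, hkS, rfl⟩ := List.mem_map.mp hkv
    exact (PySem.Set.mem_ofList _ _).mp hkS
  have hnn := pvTargets_nonneg flashes kv.1 hk
  split_ifs with hcond
  · rfl
  · exact (pvAddAt_oob g kv.1 kv.2 hnn.1 hnn.2 hcond).symm

-- ===== VERDICT (by name: the statement is the Claim_ definition above) =====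
theorem make_flashes_spec : Claim_equal_make_flashes := by
  intro charge flashes _
  unfold Spec_make_flashes
  have hA : ((pvTargets flashes).map (fun k => (k, (1 : Int)))).foldl
      (fun g kc => pvAddAt g kc.1 kc.2) charge
      = (pvTargets flashes).foldl (fun g k => pvAddAt g k 1) charge := by
    rw [List.foldl_map]
  rw [pvA_eq, pvB_eq, ← hA]
  have hnnA : ∀ kc ∈ (pvTargets flashes).map (fun k => (k, (1 : Int))),
      0 ≤ kc.1.1 ∧ 0 ≤ kc.1.2 := by
    intro kc hkc
    obtain ⟨k, hk, rfl⟩ := List.mem_map.mp hkc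
    exact pvTargets_nonneg flashes k hk
  have hnnB : ∀ kc ∈ (PySem.Set.ofList (pvTargets flashes)).map
      (fun k => (k, ((pvTargets flashes).count k : Int))), 0 ≤ kc.1.1 ∧ 0 ≤ kc.1.2 := by
    intro kc hkc
    obtain ⟨k, hk, rfl⟩ := List.mem_map.mp hkc
    exact pvTargets_nonneg flashes k ((PySem.Set.mem_ofList _ _).mp hk)
  apply pvEq_of_ent
  · rw [pvLen_foldl, pvLen_foldl]
  · intro r
    rw [pvRowLen_foldl, pvRowLen_foldl]
  · intro r c
    rw [pvEnt_foldl _ _ hnnA r c, pvEnt_foldl _ _ hnnB r c]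
    congr 1
    by_cases hin : r < charge.length ∧ c < (pvRowAt charge r).length
    · rw [if_pos hin, if_pos hin]
      exact pvSum_eq (pvTargets flashes) ((r : Int), (c : Int))
    · rw [if_neg hin, if_neg hin]
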